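-- pv_equiv track=rewrite | github.com/blueman82/recall | hooks/recall-context.py | fallback_context
-- ===== SOURCE A (Python) =====
-- def fallback_context(memories: list[dict]) -> str:
--     """Generate simple context when Ollama is unavailable.
--
--     Args:
--         memories: List of memory dicts
--
--     Returns:
--         Basic markdown context
--     """
--     if not memories:
--         return ""
--
--     # RFC 2119 preamble
--     lines = [
--         "# Memory Context",
--         "",
--         'The key words "MUST", "MUST NOT", "REQUIRED", "SHALL", "SHALL NOT", '
--         '"SHOULD", "SHOULD NOT", "RECOMMENDED", "MAY", and "OPTIONAL" in these '
--         "memories are to be interpreted as described in RFC 2119.",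
--         "",
--         "---",
--         "",
--     ]
--
--     # Group by type
--     by_type: dict[str, list[str]] = {
--         "golden_rule": [],
--         "preference": [],
--         "pattern": [],
--         "decision": [],
--         "other": [],
--     }
--
--     for mem in memories:
--         mem_type = mem.get("type", "other")
--         content = mem.get("content", "")
--         source = mem.get("_source", "")
--         namespace_tag = f" [{source}]" if source else ""
--
--         if mem_type in by_type:
--             by_type[mem_type].append(f"- {content}{namespace_tag}")
--         else:
--             by_type["other"].append(f"- {content}{namespace_tag}")
--
--     # Output sections
--     if by_type["golden_rule"]:
--         lines.append("## Golden Rules")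
--         lines.extend(by_type["golden_rule"])
--         lines.append("")
--
--     if by_type["preference"]:
--         lines.append("## Preferences")
--         lines.extend(by_type["preference"])
--         lines.append("")
--
--     if by_type["pattern"]:
--         lines.append("## Patterns")
--         lines.extend(by_type["pattern"])
--         lines.append("")
--
--     if by_type["decision"]:
--         lines.append("## Recent Decisions")
--         lines.extend(by_type["decision"])
--         lines.append("")
--
--     return "\n".join(lines)
-- ===== SOURCE B (Python) =====
-- def fallback_context(memories: list[dict]) -> str:
--     """Generate simple context when Ollama is unavailable (table-driven)."""
--     if not memories:
--         return ""
--
--     lines = [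
--         "# Memory Context",
--         "",
--         'The key words "MUST", "MUST NOT", "REQUIRED", "SHALL", "SHALL NOT", '
--         '"SHOULD", "SHOULD NOT", "RECOMMENDED", "MAY", and "OPTIONAL" in these '
--         "memories are to be interpreted as described in RFC 2119.",
--         "",
--         "---",
--         "",
--     ]
--
--     sections = [
--         ("golden_rule", "## Golden Rules"),
--         ("preference", "## Preferences"),
--         ("pattern", "## Patterns"),
--         ("decision", "## Recent Decisions"),
--     ]
--
--     for mem_type, heading in sections:
--         items = [
--             "- {}{}".format(
--                 mem.get("content", ""),
--                 " [{}]".format(mem["_source"]) if mem.get("_source", "") else "",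
--             )
--             for mem in memories
--             if mem.get("type", "other") == mem_type
--         ]
--         if items:
--             lines.append(heading)
--             lines.extend(items)
--             lines.append("")
--
--     return "\n".join(lines)
-- ===== Notes on version B (the rewrite author's own statement) =====
-- stated objective: simpler
-- what changed: Replaces the one-pass five-bucket dict grouping (and four copied if-blocks plus a dead 'other' bucket) with a table of (type, heading) sections filled by one per-section comprehension in a single loop.
import Mathlib
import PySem

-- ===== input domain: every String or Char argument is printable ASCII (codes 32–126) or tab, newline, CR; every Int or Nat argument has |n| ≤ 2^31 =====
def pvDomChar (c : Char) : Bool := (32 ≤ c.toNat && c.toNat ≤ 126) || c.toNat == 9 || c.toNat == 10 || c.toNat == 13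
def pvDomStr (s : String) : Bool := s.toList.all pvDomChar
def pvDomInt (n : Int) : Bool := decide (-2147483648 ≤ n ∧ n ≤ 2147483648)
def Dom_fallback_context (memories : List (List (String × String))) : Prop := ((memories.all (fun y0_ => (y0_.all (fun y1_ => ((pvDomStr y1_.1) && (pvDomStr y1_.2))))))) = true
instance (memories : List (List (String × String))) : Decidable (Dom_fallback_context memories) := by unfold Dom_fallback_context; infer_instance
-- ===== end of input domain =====

-- B replaces A's one-pass five-bucket dict grouping by a table of (type, heading)
-- sections, each filled by a per-section scan: no dict, no dead "other" bucket,
-- one loop instead of four copied if-blocks; same output.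

-- shared formatting of one memory line, f"- {content}{namespace_tag}"
def pvMemLine (m : List (String × String)) : String :=
  let content := (PySem.Dict.mk m).getD "content" ""
  let source := (PySem.Dict.mk m).getD "_source" ""
  let namespaceTag := if source = "" then "" else " [" ++ source ++ "]"
  "- " ++ content ++ namespaceTag

-- the RFC 2119 preamble lines (identical literal in both Pythons)
def pvPreamble : List String :=
  [ "# Memory Context",
    "",
    "The key words \"MUST\", \"MUST NOT\", \"REQUIRED\", \"SHALL\", \"SHALL NOT\", \"SHOULD\", \"SHOULD NOT\", \"RECOMMENDED\", \"MAY\", and \"OPTIONAL\" in these memories are to be interpreted as described in RFC 2119.",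
    "",
    "---",
    "" ]

-- ===== PORT A =====
-- by_type initialised with its five literal keys
def pvInit : PySem.Dict String (List String) :=
  ((((PySem.Dict.empty.insert "golden_rule" []).insert "preference" []).insert
      "pattern" []).insert "decision" []).insert "other" []

-- the body of A's 'for mem in memories' loop:
-- 'if mem_type in by_type: by_type[mem_type].append(line) else: by_type["other"].append(line)'
-- (mem.get(k, dflt) = (PySem.Dict.mk mem).getD k dflt, first match, as in a Python dict)
def pvStep (d : PySem.Dict String (List String)) (mem : List (String × String)) :
    PySem.Dict String (List String) :=
  let memType := (PySem.Dict.mk mem).getD "type" "other"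
  let line := pvMemLine mem
  if d.contains memType then d.modify memType [] (fun l => l ++ [line])
  else d.modify "other" [] (fun l => l ++ [line])

def fallback_context (memories : List (List (String × String))) : String :=
  if memories = [] then "" else
  let lines : List String := pvPreamble
  let byType := memories.foldl pvStep pvInit
  let lines := if byType.getD "golden_rule" [] ≠ [] then
      lines ++ ["## Golden Rules"] ++ byType.getD "golden_rule" [] ++ [""] else lines
  let lines := if byType.getD "preference" [] ≠ [] then
      lines ++ ["## Preferences"] ++ byType.getD "preference" [] ++ [""] else lines
  let lines := if byType.getD "pattern" [] ≠ [] then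
      lines ++ ["## Patterns"] ++ byType.getD "pattern" [] ++ [""] else lines
  let lines := if byType.getD "decision" [] ≠ [] then
      lines ++ ["## Recent Decisions"] ++ byType.getD "decision" [] ++ [""] else lines
  PySem.Str.join "\n" lines

-- ===== PORT B =====
def fallback_context_alt (memories : List (List (String × String))) : String :=
  if memories = [] then "" else
  let sections : List (String × String) :=
    [ ("golden_rule", "## Golden Rules"),
      ("preference", "## Preferences"),
      ("pattern", "## Patterns"),
      ("decision", "## Recent Decisions") ]
  let lines := sections.foldl (fun acc sec =>
      let items := (memories.filter
          (fun mem => (PySem.Dict.mk mem).getD "type" "other" == sec.1)).map pvMemLine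
      if items = [] then acc else acc ++ [sec.2] ++ items ++ [""]) pvPreamble
  PySem.Str.join "\n" lines

-- ===== PRECONDITION & SPEC =====
def Spec_fallback_context (memories : List (List (String × String))) (out : String) : Prop := out = fallback_context_alt memories
instance (memories : List (List (String × String))) (out : String) : Decidable (Spec_fallback_context memories out) := by unfold Spec_fallback_context; infer_instance

-- ===== CLAIM (what is proved, stated in full; the proofs are below) =====
def Claim_equal_fallback_context : Prop := ∀ (memories : List (List (String × String))), Dom_fallback_context memories → Spec_fallback_context memories (fallback_context memories)

-- ===== LEMMAS AND PROOFS =====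

def pvTyp (m : List (String × String)) : String := (PySem.Dict.mk m).getD "type" "other"

def pvK5 : List String := ["golden_rule", "preference", "pattern", "decision", "other"]

def pvRoute (m : List (String × String)) : String :=
  if pvTyp m ∈ pvK5 then pvTyp m else "other"

lemma pvStep_eq_pair (d : PySem.Dict String (List String)) (m : List (String × String))
    (hk : d.keys = pvK5) :
    pvStep d m = d.modify (pvRoute m) [] (fun l => l ++ [pvMemLine m]) := by
  have ht : (PySem.Dict.mk m).getD "type" "other" = pvTyp m := rfl
  simp only [pvStep, pvRoute]
  rw [PySem.Dict.contains_eq_decide_mem_keys, hk, ht]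
  by_cases h : pvTyp m ∈ pvK5 <;> simp [h]

lemma pvRoute_mem_pvK5 (m : List (String × String)) : pvRoute m ∈ pvK5 := by
  unfold pvRoute
  by_cases h : pvTyp m ∈ pvK5
  · rw [if_pos h]; exact h
  · rw [if_neg h]; decide

lemma pvStep_keys (d : PySem.Dict String (List String)) (m : List (String × String))
    (hk : d.keys = pvK5) : (pvStep d m).keys = pvK5 := by
  rw [pvStep_eq_pair d m hk, PySem.Dict.keys_modify]
  have hc : d.contains (pvRoute m) = true := by
    rw [PySem.Dict.contains_eq_decide_mem_keys, hk]
    exact decide_eq_true (pvRoute_mem_pvK5 m)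
  rw [PySem.Dict.keys_insert_of_contains _ _ hc, hk]

lemma pvFold_eq_pairs (ms : List (List (String × String)))
    (d : PySem.Dict String (List String)) (hk : d.keys = pvK5) :
    ms.foldl pvStep d =
      (ms.map (fun m => (pvRoute m, pvMemLine m))).foldl
        (fun d p => d.modify p.1 [] (fun l => l ++ [p.2])) d := by
  induction ms generalizing d with
  | nil => rfl
  | cons m ms ih =>
    simp only [List.foldl, List.map]
    rw [pvStep_eq_pair d m hk]
    exact ih _ (by rw [← pvStep_eq_pair d m hk]; exact pvStep_keys d m hk)

lemma pvRoute_beq (m : List (String × String)) (c : String) (hc : c ∈ pvK5)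
    (hco : c ≠ "other") : (pvRoute m == c) = (pvTyp m == c) := by
  unfold pvRoute
  by_cases h : pvTyp m ∈ pvK5
  · simp [h]
  · simp only [h, if_false]
    have h2 : (pvTyp m == c) = false := by
      by_cases he : pvTyp m = c
      · exact absurd (he ▸ hc) h
      · simp [he]
    simp [Ne.symm hco, h2]

lemma pvBucket (ms : List (List (String × String))) (c : String) (hc : c ∈ pvK5)
    (hco : c ≠ "other") (h0 : pvInit.getD c [] = []) :
    (ms.foldl pvStep pvInit).getD c [] =
      (ms.filter (fun m => pvTyp m == c)).map pvMemLine := by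
  rw [pvFold_eq_pairs ms pvInit (by decide), PySem.Dict.getD_foldl_modify_append, h0,
    List.filter_map]
  simp only [List.map_map, List.nil_append]
  have h3 : ((fun (p : String × String) => p.1 == c) ∘ fun m => (pvRoute m, pvMemLine m)) =
      (fun m => pvTyp m == c) := by
    funext m
    exact pvRoute_beq m c hc hco
  rw [h3]
  rfl

-- ===== VERDICT (by name: the statement is the Claim_ definition above) =====
theorem fallback_context_spec : Claim_equal_fallback_context := by
  intro memories _
  unfold Spec_fallback_context fallback_context fallback_context_alt
  by_cases hm : memories = []
  · simp [hm]
  · have hg := pvBucket memories "golden_rule" (by decide) (by decide) (by decide)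
    have hp := pvBucket memories "preference" (by decide) (by decide) (by decide)
    have hpa := pvBucket memories "pattern" (by decide) (by decide) (by decide)
    have hd := pvBucket memories "decision" (by decide) (by decide) (by decide)
    simp only [pvTyp] at hg hp hpa hd
    simp only [hm, if_false, List.foldl, hg, hp, hpa, hd]
    by_cases h1 : (memories.filter
        (fun m => ((PySem.Dict.mk m).getD "type" "other" == "golden_rule"))).map pvMemLine = [] <;>
      by_cases h2 : (memories.filter
        (fun m => ((PySem.Dict.mk m).getD "type" "other" == "preference"))).map pvMemLine = [] <;>
      by_cases h3 : (memories.filter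
        (fun m => ((PySem.Dict.mk m).getD "type" "other" == "pattern"))).map pvMemLine = [] <;>
      by_cases h4 : (memories.filter
        (fun m => ((PySem.Dict.mk m).getD "type" "other" == "decision"))).map pvMemLine = [] <;>
      simp [h1, h2, h3, h4]
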